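-- pv_equiv track=rewrite | github.com/RxstydnR/signate-rag1 | components/utils.py | merge_sequential_chunks
-- ===== SOURCE A (Python) =====
-- from typing import List
--
-- def merge_sequential_chunks(chunks:List[str]) -> str:
--
--     assert len(chunks)>0
--
--     result = chunks[0]
--     for chunk in chunks[1:]:
--         # 重複部分を見つける
--         overlap_end = 0
--         for i in range(1, len(chunk) + 1):
--             if result.endswith(chunk[:i]):
--                 overlap_end = i
--
--         # 重複部分を除いて結合
--         result += chunk[overlap_end:]
--
--     return result
-- ===== SOURCE B (Python) =====
-- from typing import List
--
-- def _tail_matches(result: str, chunk: str, k: int) -> bool: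
--     # does result end with chunk[:k]?  compare characters, bail at first mismatch
--     off = len(result) - k
--     for j in range(k):
--         if result[off + j] != chunk[j]:
--             return False
--     return True
--
-- def merge_sequential_chunks(chunks: List[str]) -> str:
--     assert len(chunks) > 0
--     result = chunks[0]
--     for chunk in chunks[1:]:
--         k = min(len(result), len(chunk))
--         while k > 0 and not _tail_matches(result, chunk, k):
--             k -= 1
--         result += chunk[k:]
--     return result
-- ===== Notes on version B (the rewrite author's own statement) =====
-- stated objective: alternative
-- what changed: A scans overlap lengths bottom-up testing every chunk prefix with endswith on a fresh slice and keeps the last hit; B searches top-down from min(len(result),len(chunk)) with a character-by-character comparison that bails at the first mismatch and stops at the first (i.e. longest) overlap found.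
import Mathlib
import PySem

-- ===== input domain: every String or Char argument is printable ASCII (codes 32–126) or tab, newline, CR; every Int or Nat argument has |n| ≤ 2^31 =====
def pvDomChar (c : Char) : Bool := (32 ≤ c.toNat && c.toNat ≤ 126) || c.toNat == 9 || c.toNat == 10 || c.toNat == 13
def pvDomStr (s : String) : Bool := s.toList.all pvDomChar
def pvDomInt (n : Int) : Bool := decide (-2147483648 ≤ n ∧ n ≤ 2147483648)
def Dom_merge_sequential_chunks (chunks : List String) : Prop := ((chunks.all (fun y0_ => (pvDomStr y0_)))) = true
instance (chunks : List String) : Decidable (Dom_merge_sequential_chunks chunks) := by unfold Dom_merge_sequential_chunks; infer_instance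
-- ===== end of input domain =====

-- B replaces A's bottom-up scan of every chunk prefix (endswith on a fresh slice, keeping the
-- last hit) by a top-down search from min(len(result),len(chunk)) that compares characters
-- directly and stops at the first (= longest) overlap; same worst-case cost, different algorithm.

-- ===== PORT A =====
-- overlap_end loop: for i in range(1, len(chunk)+1): if result.endswith(chunk[:i]): overlap_end = i
def mscOverlapA (result chunk : List Char) : Int :=
  (PySem.List.pyRange 1 ((chunk.length : Int) + 1)).foldl
    (fun overlap_end i =>
      if PySem.Chars.endswith result (PySem.List.slice chunk none (some i)) then i
      else overlap_end) 0

-- result += chunk[overlap_end:]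
def mscStepA (result chunk : List Char) : List Char :=
  result ++ PySem.List.slice chunk (some (mscOverlapA result chunk)) none

def merge_sequential_chunks (chunks : List String) : String :=
  match chunks with
  | [] => ""   -- Python raises AssertionError here; excluded by Pre_
  | c0 :: rest =>
      String.ofList (rest.foldl (fun result chunk => mscStepA result chunk.toList) c0.toList)

-- ===== PORT B =====
-- _tail_matches inner loop: for j in range(k): if result[off+j] != chunk[j]: return False
-- (List.getD is exact for Python's result[off+j]/chunk[j] here: the indices are nonnegative
--  and in range whenever the function is called, since off = len(result)-k, j < k ≤ min of the lengths)
def mscTailMatchesFrom (result chunk : List Char) (off j k : Nat) : Bool :=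
  if j < k then
    if result.getD (off + j) default != chunk.getD j default then false
    else mscTailMatchesFrom result chunk off (j + 1) k
  else true
termination_by k - j

def mscTailMatches (result chunk : List Char) (k : Nat) : Bool :=
  mscTailMatchesFrom result chunk (result.length - k) 0 k

-- while k > 0 and not _tail_matches(result, chunk, k): k -= 1
def mscFindK (result chunk : List Char) : Nat → Nat
  | 0 => 0
  | k + 1 => if mscTailMatches result chunk (k + 1) then k + 1 else mscFindK result chunk k

-- result += chunk[k:]
def mscStepB (result chunk : List Char) : List Char :=
  result ++ chunk.drop (mscFindK result chunk (min result.length chunk.length))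

def merge_sequential_chunks_alt (chunks : List String) : String :=
  match chunks with
  | [] => ""
  | c0 :: rest =>
      String.ofList (rest.foldl (fun result chunk => mscStepB result chunk.toList) c0.toList)

-- ===== PRECONDITION & SPEC =====
-- A asserts len(chunks) > 0 (AssertionError on []); Pre_ excludes exactly the empty list.
def Pre_merge_sequential_chunks (chunks : List String) : Prop := chunks ≠ []
instance (chunks : List String) : Decidable (Pre_merge_sequential_chunks chunks) := by
  unfold Pre_merge_sequential_chunks; infer_instance
def pvWitness_merge_sequential_chunks : List String := ["abcd", "cdef"]

def Spec_merge_sequential_chunks (chunks : List String) (out : String) : Prop := out = merge_sequential_chunks_alt chunks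
instance (chunks : List String) (out : String) : Decidable (Spec_merge_sequential_chunks chunks out) := by unfold Spec_merge_sequential_chunks; infer_instance

-- ===== CLAIM (what is proved, stated in full; the proofs are below) =====
def Claim_equal_merge_sequential_chunks : Prop := ∀ (chunks : List String), Dom_merge_sequential_chunks chunks → Pre_merge_sequential_chunks chunks → Spec_merge_sequential_chunks chunks (merge_sequential_chunks chunks)

-- ===== LEMMAS AND PROOFS =====

-- A's overlap loop, read off one i at a time from the top: the same recursion shape as mscFindK
def mscAMax (result chunk : List Char) : Nat → Nat
  | 0 => 0
  | m + 1 => if PySem.Chars.endswith result (chunk.take (m + 1)) then m + 1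
             else mscAMax result chunk m

theorem mscTailMatchesFrom_iff (result chunk : List Char) (off k : Nat) :
    ∀ n j, k - j ≤ n →
      (mscTailMatchesFrom result chunk off j k = true ↔
        ∀ t, j ≤ t → t < k → result.getD (off + t) default = chunk.getD t default) := by
  intro n
  induction n with
  | zero =>
      intro j hj
      rw [mscTailMatchesFrom]
      have : ¬ j < k := by omega
      simp [this]
      intro t ht1 ht2; omega
  | succ n ih =>
      intro j hj
      rw [mscTailMatchesFrom]
      by_cases hjk : j < k
      · rw [if_pos hjk]
        cases hb : (result.getD (off + j) default != chunk.getD j default) with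
        | true =>
            constructor
            · intro h; exact absurd h (by simp)
            · intro h
              exact absurd (h j le_rfl hjk) (bne_iff_ne.mp hb)
        | false =>
            simp only [Bool.false_eq_true, if_false]
            rw [ih (j + 1) (by omega)]
            constructor
            · intro h t ht1 ht2
              rcases Nat.eq_or_lt_of_le ht1 with h1 | h1
              · subst h1; simpa using hb
              · exact h t h1 ht2
            · intro h t ht1 ht2; exact h t (by omega) ht2
      · rw [if_neg hjk]
        simp
        intro t ht1 ht2; omega

theorem mscTailMatches_iff (result chunk : List Char) (k : Nat)
    (hr : k ≤ result.length) (hc : k ≤ chunk.length) :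
    (mscTailMatches result chunk k = true ↔ chunk.take k <:+ result) := by
  unfold mscTailMatches
  rw [mscTailMatchesFrom_iff result chunk (result.length - k) k k 0 (by omega)]
  rw [List.suffix_iff_eq_drop]
  have hlt : (chunk.take k).length = k := by simp [hc]
  rw [hlt]
  have hld : (result.drop (result.length - k)).length = k := by simp; omega
  constructor
  · intro h
    apply List.ext_getElem (by rw [hlt, hld])
    intro i h1 h2
    have hik : i < k := by omega
    have := h i (Nat.zero_le _) hik
    have e1 : result.getD (result.length - k + i) default
        = result[result.length - k + i]'(by omega) := List.getD_eq_getElem _ _ _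
    have e2 : chunk.getD i default = chunk[i]'(by omega) := List.getD_eq_getElem _ _ _
    rw [e1, e2] at this
    simp only [List.getElem_take, List.getElem_drop]
    exact this.symm
  · intro h t _ htk
    have h1 := congrArg (fun l => l.getD t default) h
    simp only at h1
    have e1 : (chunk.take k).getD t default = (chunk.take k)[t]'(by omega) :=
      List.getD_eq_getElem _ _ (by omega)
    have e2 : (result.drop (result.length - k)).getD t default
        = (result.drop (result.length - k))[t]'(by omega) :=
      List.getD_eq_getElem _ _ (by omega)
    rw [e1, e2] at h1
    have e3 : result.getD (result.length - k + t) default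
        = result[result.length - k + t]'(by omega) := List.getD_eq_getElem _ _ _
    have e4 : chunk.getD t default = chunk[t]'(by omega) := List.getD_eq_getElem _ _ _
    rw [e3, e4]
    simpa [List.getElem_take, List.getElem_drop] using h1.symm

-- A's foldl over range(1, m+1) equals the top-down reading mscAMax
theorem mscOverlapA_fold (result chunk : List Char) (m : Nat) :
    (PySem.List.pyRange 1 ((m : Int) + 1)).foldl
      (fun overlap_end i =>
        if PySem.Chars.endswith result (PySem.List.slice chunk none (some i)) then i
        else overlap_end) 0 = (mscAMax result chunk m : Int) := by
  induction m with
  | zero =>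
      have h0 : PySem.List.pyRange 1 (((0 : Nat) : Int) + 1) = [] := by decide
      rw [h0]; rfl
  | succ m ih =>
      have hcast : ((m + 1 : Nat) : Int) + 1 = ((m : Int) + 1) + 1 := by push_cast; ring
      rw [hcast, PySem.List.pyRange_one_succ_right (by omega), List.foldl_append, ih]
      simp only [List.foldl_cons, List.foldl_nil]
      have hsl : PySem.List.slice chunk none (some ((m : Int) + 1))
          = chunk.take (m + 1) := by
        have hc : ((m : Int) + 1) = ((m + 1 : Nat) : Int) := by push_cast; ring
        rw [hc, PySem.List.slice_to_natCast]
      rw [hsl, mscAMax]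
      split_ifs with h
      · push_cast; ring
      · rfl

theorem mscAMax_eq_findK (result chunk : List Char) (m : Nat)
    (hm : m ≤ min result.length chunk.length) :
    mscAMax result chunk m = mscFindK result chunk m := by
  induction m with
  | zero => rfl
  | succ m ih =>
      rw [mscAMax, mscFindK]
      have h1 : m + 1 ≤ result.length := by omega
      have h2 : m + 1 ≤ chunk.length := by omega
      have hiff := PySem.Chars.endswith_iff result (chunk.take (m + 1))
      have hiff2 := mscTailMatches_iff result chunk (m + 1) h1 h2
      have he : PySem.Chars.endswith result (chunk.take (m + 1))
          = mscTailMatches result chunk (m + 1) := by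
        by_cases h : chunk.take (m + 1) <:+ result
        · rw [hiff.mpr h, hiff2.mpr h]
        · rw [Bool.eq_false_iff.mpr (fun hb => h (hiff.mp hb)),
              Bool.eq_false_iff.mpr (fun hb => h (hiff2.mp hb))]
      rw [he, ih (by omega)]

theorem mscAMax_high (result chunk : List Char) :
    ∀ m, min result.length chunk.length ≤ m → m ≤ chunk.length →
      mscAMax result chunk m = mscAMax result chunk (min result.length chunk.length) := by
  intro m
  induction m with
  | zero =>
      intro hm _
      have h0 : min result.length chunk.length = 0 := by omega
      rw [h0]
  | succ m ih =>
      intro hm hc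
      rcases Nat.eq_or_lt_of_le hm with h | h
      · rw [h]
      · rw [mscAMax]
        have hfalse : PySem.Chars.endswith result (chunk.take (m + 1)) = false := by
          apply Bool.eq_false_iff.mpr
          intro habs
          have hlen := ((PySem.Chars.endswith_iff _ _).mp habs).length_le
          rw [List.length_take] at hlen
          omega
        rw [hfalse]
        simp only [Bool.false_eq_true, if_false]
        exact ih (by omega) (by omega)

theorem mscStep_eq (result chunk : List Char) : mscStepA result chunk = mscStepB result chunk := by
  unfold mscStepA mscStepB
  have hov : mscOverlapA result chunk
      = (mscFindK result chunk (min result.length chunk.length) : Int) := by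
    unfold mscOverlapA
    rw [mscOverlapA_fold result chunk chunk.length,
        mscAMax_high result chunk chunk.length (Nat.min_le_right _ _) le_rfl,
        mscAMax_eq_findK result chunk _ le_rfl]
  rw [hov, PySem.List.slice_from_natCast]

-- ===== VERDICT (by name: the statement is the Claim_ definition above) =====
theorem merge_sequential_chunks_spec : Claim_equal_merge_sequential_chunks := by
  intro chunks _ hpre
  unfold Spec_merge_sequential_chunks
  match chunks with
  | [] => exact absurd rfl hpre
  | c0 :: rest =>
      unfold merge_sequential_chunks merge_sequential_chunks_alt
      simp only [mscStep_eq]
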